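-- pv_equiv track=rewrite | github.com/shreyasmene06/3psLCCA-core-task | src/three_ps_lcca_core/core/latex/report.py | is_symbolic_formula
-- ===== SOURCE A (Python) =====
-- FORMULA_OPERATORS = {
--     "*": "*",
--     "+": "+",
--     "-": "-",
--     "/": "/",
--     "=": "=",
--     "x": "*",
--     "(": "(",
--     ")": ")",
-- }
--
-- def tokenize_formula(formula: str) -> list[str]:
--     prepared = formula
--     for operator in ("(", ")", "+", "-", "/", "=", "*"):
--         prepared = prepared.replace(operator, f" {operator} ")
--     return prepared.split()
--
-- def is_symbolic_formula(formula: str) -> bool: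
--     stripped = formula.strip()
--     if not stripped:
--         return False
--     if stripped.lower().startswith("calculated based on"):
--         return False
--     tokens = tokenize_formula(stripped)
--     if len(tokens) == 1:
--         return True
--     return any(token in FORMULA_OPERATORS for token in tokens)
-- ===== SOURCE B (Python) =====
-- def is_symbolic_formula(formula: str) -> bool:
--     stripped = formula.strip()
--     if not stripped:
--         return False
--     if stripped.lower().startswith("calculated based on"):
--         return False
--     if set(stripped) & set("+-/=*()"):
--         return True
--     words = stripped.split()
--     return len(words) == 1 or "x" in words
-- ===== Notes on version B (the rewrite author's own statement) =====
-- stated objective: simpler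
-- what changed: Instead of space-padding the seven operator characters, re-splitting the whole string and scanning the token list against the operator dict, B returns True as soon as any operator character occurs anywhere in the stripped string, and otherwise just splits on whitespace and checks for a single word or for a whole word equal to the letter x (the dict's multiplication alias).
import Mathlib
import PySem

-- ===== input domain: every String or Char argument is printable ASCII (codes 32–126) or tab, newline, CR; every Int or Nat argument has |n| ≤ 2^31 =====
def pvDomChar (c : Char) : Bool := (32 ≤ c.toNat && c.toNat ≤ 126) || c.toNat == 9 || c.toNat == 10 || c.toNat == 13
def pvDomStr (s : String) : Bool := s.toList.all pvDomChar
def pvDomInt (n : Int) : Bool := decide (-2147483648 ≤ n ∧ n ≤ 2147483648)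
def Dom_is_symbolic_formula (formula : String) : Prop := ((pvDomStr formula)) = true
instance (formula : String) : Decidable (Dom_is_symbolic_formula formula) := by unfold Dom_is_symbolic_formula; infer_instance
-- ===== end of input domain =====

-- B replaces A's tokenize-then-scan (pad every operator with spaces, re-split, scan the token
-- list against the operator dict) by a direct test: any operator character anywhere makes the
-- formula symbolic, otherwise only the plain whitespace words matter (a single word, or a
-- standalone word "x").  Same return value, simpler decomposition.

-- ===== PORT A =====
def FORMULA_OPERATORS : PySem.Dict (List Char) (List Char) :=
  PySem.Dict.ofList
    [(['*'], ['*']), (['+'], ['+']), (['-'], ['-']), (['/'], ['/']),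
     (['='], ['=']), (['x'], ['*']), (['('], ['(']), ([')'], [')'])]

def tokenize_formula (formula : List Char) : List (List Char) :=
  let prepared := ['(', ')', '+', '-', '/', '=', '*'].foldl
    (fun p op => PySem.Chars.replace p [op] [' ', op, ' ']) formula
  PySem.Chars.split₀ prepared

def is_symbolic_formula (formula : String) : Bool :=
  let stripped := PySem.Chars.strip formula.toList
  if stripped.isEmpty then false
  else if PySem.Chars.startswith (PySem.Chars.lower stripped) "calculated based on".toList then false
  else
    let tokens := tokenize_formula stripped
    if tokens.length == 1 then true
    else tokens.any (fun t => (PySem.Dict.get? FORMULA_OPERATORS t).isSome)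

-- ===== PORT B =====
def is_symbolic_formula_alt (formula : String) : Bool :=
  let stripped := PySem.Chars.strip formula.toList
  if stripped.isEmpty then false
  else if PySem.Chars.startswith (PySem.Chars.lower stripped) "calculated based on".toList then false
  else if !(PySem.Set.inter (PySem.Set.ofList stripped) (PySem.Set.ofList "+-/=*()".toList)).isEmpty then true
  else
    let words := PySem.Chars.split₀ stripped
    words.length == 1 || words.contains ['x']

-- ===== PRECONDITION & SPEC =====
def Spec_is_symbolic_formula (formula : String) (out : Bool) : Prop := out = is_symbolic_formula_alt formula
instance (formula : String) (out : Bool) : Decidable (Spec_is_symbolic_formula formula out) := by unfold Spec_is_symbolic_formula; infer_instance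

-- ===== CLAIM (what is proved, stated in full; the proofs are below) =====
def Claim_equal_is_symbolic_formula : Prop := ∀ (formula : String), Dom_is_symbolic_formula formula → Spec_is_symbolic_formula formula (is_symbolic_formula formula)

-- ===== LEMMAS AND PROOFS =====

/-- The operator characters A pads with spaces, in A's replacement order. -/
def opChars : List Char := ['(', ')', '+', '-', '/', '=', '*']

/-- Expansion of a string: every character in `S` gets surrounded by spaces. -/
def expand (S : List Char) (s : List Char) : List Char :=
  s.flatMap (fun d => if d ∈ S then [' ', d, ' '] else [d])

lemma replace_go_single (c : Char) (n : List Char) :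
    ∀ (l : List Char) (fuel : Nat) (acc : List Char), l.length ≤ fuel →
      PySem.Chars.replace.go [c] n fuel l acc
        = acc.reverse ++ l.flatMap (fun d => if d = c then n else [d]) := by
  intro l
  induction l with
  | nil => intro fuel acc h; cases fuel <;> simp [PySem.Chars.replace.go]
  | cons d t ih =>
    intro fuel acc h
    cases fuel with
    | zero => simp at h
    | succ fuel =>
      simp only [PySem.Chars.replace.go, List.isPrefixOf, List.flatMap_cons]
      by_cases hd : d = c
      · subst hd
        simp only [BEq.rfl, Bool.true_and, List.length_cons, List.length_nil,
          Nat.zero_add, List.drop_one, List.tail_cons]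
        rw [ih fuel _ (by simpa using h)]
        simp
      · have hbe : (c == d) = false := beq_eq_false_iff_ne.mpr (fun h => hd h.symm)
        simp only [hbe, Bool.false_and, Bool.false_eq_true, if_false, if_neg hd]
        rw [ih fuel _ (by simpa using Nat.le_of_succ_le_succ h)]
        simp

/-- `str.replace` with a one-character pattern is a per-character flatMap. -/
lemma replace_single (c : Char) (n s : List Char) :
    PySem.Chars.replace s [c] n = s.flatMap (fun d => if d = c then n else [d]) := by
  simp [PySem.Chars.replace, replace_go_single c n s s.length [] le_rfl]

lemma expand_nil (s : List Char) : expand [] s = s := by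
  simp [expand]

/-- Expanding one more (fresh, non-space) character. -/
lemma expand_step (S : List Char) (c : Char) (s : List Char)
    (hc : c ∉ S) (hcs : c ≠ ' ') :
    (expand S s).flatMap (fun d => if d = c then [' ', c, ' '] else [d]) = expand (S ++ [c]) s := by
  unfold expand
  rw [List.flatMap_assoc]
  apply List.flatMap_congr
  intro d _
  by_cases hdS : d ∈ S
  · have hdc : d ≠ c := fun h => hc (h ▸ hdS)
    have hsp : ¬(' ' = c) := fun h => hcs h.symm
    simp [hdS, hdc, if_neg hsp]
  · by_cases hdc : d = c
    · subst hdc; simp [hdS]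
    · simp [hdS, hdc]

lemma fold_expand : ∀ (ops : List Char), ops.Nodup → (' ' ∉ ops) →
    ∀ (S s : List Char), (∀ c ∈ ops, c ∉ S) → ' ' ∉ S →
    ops.foldl (fun p op => PySem.Chars.replace p [op] [' ', op, ' ']) (expand S s)
      = expand (S ++ ops) s := by
  intro ops
  induction ops with
  | nil => intro _ _ S s _ _; simp
  | cons c t ih =>
    intro hnd hsp S s hfresh hS
    simp only [List.foldl_cons]
    rw [replace_single, expand_step S c s (hfresh c (by simp)) (fun h => hsp (h ▸ List.mem_cons_self))]
    rw [ih (by simpa using hnd.of_cons) (fun h => hsp (List.mem_cons_of_mem _ h)) (S ++ [c]) s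
      (by intro d hd; simp only [List.mem_append, List.mem_singleton]
          rintro (h | rfl)
          · exact hfresh d (List.mem_cons_of_mem _ hd) h
          · exact (List.nodup_cons.mp hnd).1 hd)
      (by simp only [List.mem_append, List.mem_singleton]
          rintro (h | h)
          · exact hS h
          · exact hsp (h ▸ List.mem_cons_self))]
    simp

/-- A's seven successive replaces compute `expand opChars`. -/
lemma prepared_eq (s : List Char) :
    ['(', ')', '+', '-', '/', '=', '*'].foldl
      (fun p op => PySem.Chars.replace p [op] [' ', op, ' ']) s = expand opChars s := by
  have := fold_expand ['(', ')', '+', '-', '/', '=', '*'] (by decide) (by decide) [] s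
    (by intro c _; simp) (by simp)
  rw [expand_nil] at this
  simpa [opChars] using this

/-- Accumulator lemma for the whitespace split. -/
lemma split_go_acc : ∀ (l cur : List Char) (acc : List (List Char)),
    PySem.Chars.split₀.go l cur acc = acc.reverse ++ PySem.Chars.split₀.go l cur [] := by
  intro l
  induction l with
  | nil =>
    intro cur acc
    by_cases hc : cur.isEmpty <;> simp [PySem.Chars.split₀.go, hc]
  | cons c t ih =>
    intro cur acc
    simp only [PySem.Chars.split₀.go]
    by_cases hsp : PySem.Chars.isspace c
    · by_cases hc : cur.isEmpty
      · simp only [hsp, hc, if_true]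
        rw [ih [] acc]
      · simp only [hsp, hc, if_true, Bool.false_eq_true, if_false]
        rw [ih [] (cur.reverse :: acc), ih [] [cur.reverse]]
        simp
    · simp only [hsp, Bool.false_eq_true, if_false]
      rw [ih (c :: cur) acc]

lemma split_go_space : ∀ (a b cur : List Char) (acc : List (List Char)),
    PySem.Chars.split₀.go (a ++ ' ' :: b) cur acc
      = PySem.Chars.split₀.go a cur acc ++ PySem.Chars.split₀.go b [] [] := by
  intro a
  induction a with
  | nil =>
    intro b cur acc
    have hsp : PySem.Chars.isspace ' ' = true := by decide
    by_cases hc : cur.isEmpty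
    · simp only [List.nil_append, PySem.Chars.split₀.go, hsp, hc, if_true]
      rw [split_go_acc b [] acc]
    · simp only [List.nil_append, PySem.Chars.split₀.go, hsp, hc, if_true, Bool.false_eq_true, if_false]
      rw [split_go_acc b [] (cur.reverse :: acc)]
  | cons c t ih =>
    intro b cur acc
    simp only [List.cons_append, PySem.Chars.split₀.go]
    by_cases hsp : PySem.Chars.isspace c
    · by_cases hc : cur.isEmpty <;> simp only [hsp, hc, if_true, Bool.false_eq_true, if_false] <;> rw [ih]
    · simp only [hsp, Bool.false_eq_true, if_false]; rw [ih]

/-- Splitting across an explicit space boundary. -/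
lemma split₀_append_space (a b : List Char) :
    PySem.Chars.split₀ (a ++ ' ' :: b) = PySem.Chars.split₀ a ++ PySem.Chars.split₀ b := by
  simp only [PySem.Chars.split₀]; rw [split_go_space]

lemma split_go_chars : ∀ (l cur : List Char) (acc : List (List Char)) (t : List Char),
    t ∈ PySem.Chars.split₀.go l cur acc → ∀ ch ∈ t, ch ∈ l ∨ ch ∈ cur ∨ ∃ u ∈ acc, ch ∈ u := by
  intro l
  induction l with
  | nil =>
    intro cur acc t ht ch hch
    by_cases hc : cur.isEmpty
    · simp only [PySem.Chars.split₀.go, hc, if_true, List.mem_reverse] at ht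
      exact Or.inr (Or.inr ⟨t, ht, hch⟩)
    · simp only [PySem.Chars.split₀.go, hc, Bool.false_eq_true, if_false, List.mem_reverse] at ht
      rcases List.mem_cons.mp ht with rfl | h
      · exact Or.inr (Or.inl (List.mem_reverse.mp hch))
      · exact Or.inr (Or.inr ⟨t, h, hch⟩)
  | cons c r ih =>
    intro cur acc t ht ch hch
    simp only [PySem.Chars.split₀.go] at ht
    by_cases hsp : PySem.Chars.isspace c
    · by_cases hc : cur.isEmpty <;> simp only [hsp, hc, if_true, Bool.false_eq_true, if_false] at ht
      · rcases ih [] acc t ht ch hch with h | h | h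
        · exact Or.inl (List.mem_cons_of_mem _ h)
        · simp at h
        · exact Or.inr (Or.inr h)
      · rcases ih [] (cur.reverse :: acc) t ht ch hch with h | h | ⟨u, hu, hchu⟩
        · exact Or.inl (List.mem_cons_of_mem _ h)
        · simp at h
        · rcases List.mem_cons.mp hu with rfl | hu
          · exact Or.inr (Or.inl (List.mem_reverse.mp hchu))
          · exact Or.inr (Or.inr ⟨u, hu, hchu⟩)
    · simp only [hsp, Bool.false_eq_true, if_false] at ht
      rcases ih (c :: cur) acc t ht ch hch with h | h | h
      · exact Or.inl (List.mem_cons_of_mem _ h)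
      · rcases List.mem_cons.mp h with rfl | h
        · exact Or.inl List.mem_cons_self
        · exact Or.inr (Or.inl h)
      · exact Or.inr (Or.inr h)

/-- Characters of any word come from the split string. -/
lemma split₀_chars_subset {s t : List Char} (ht : t ∈ PySem.Chars.split₀ s)
    {ch : Char} (hch : ch ∈ t) : ch ∈ s := by
  rcases split_go_chars s [] [] t ht ch hch with h | h | h
  · exact h
  · simp at h
  · simp at h

lemma split₀_single {c : Char} (h : PySem.Chars.isspace c = false) :
    PySem.Chars.split₀ [c] = [[c]] := by
  simp [PySem.Chars.split₀, PySem.Chars.split₀.go, h]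

/-- Membership of a token in A's operator dict, spelled out. -/
lemma get?_isSome_iff (t : List Char) :
    (PySem.Dict.get? FORMULA_OPERATORS t).isSome = true ↔
      t = ['*'] ∨ t = ['+'] ∨ t = ['-'] ∨ t = ['/'] ∨ t = ['='] ∨ t = ['x'] ∨ t = ['('] ∨ t = [')'] := by
  have hitems : FORMULA_OPERATORS.items =
      [(['*'], ['*']), (['+'], ['+']), (['-'], ['-']), (['/'], ['/']),
       (['='], ['=']), (['x'], ['*']), (['('], ['(']), ([')'], [')'])] := by decide
  rw [PySem.Dict.get?, hitems]
  by_cases h0 : t = ['*']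
  · subst h0; decide
  by_cases h1 : t = ['+']
  · subst h1; decide
  by_cases h2 : t = ['-']
  · subst h2; decide
  by_cases h3 : t = ['/']
  · subst h3; decide
  by_cases h4 : t = ['=']
  · subst h4; decide
  by_cases h5 : t = ['x']
  · subst h5; decide
  by_cases h6 : t = ['(']
  · subst h6; decide
  by_cases h7 : t = [')']
  · subst h7; decide
  have hn : List.find? (fun p => p.1 == t)
      [(['*'], ['*']), (['+'], ['+']), (['-'], ['-']), (['/'], ['/']),
       (['='], ['=']), (['x'], ['*']), (['('], ['(']), ([')'], [')'])] = none := by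
    rw [List.find?_eq_none]
    intro x hx
    fin_cases hx <;> simp <;> intro h <;> first
      | exact h0 h.symm | exact h1 h.symm | exact h2 h.symm | exact h3 h.symm
      | exact h4 h.symm | exact h5 h.symm | exact h6 h.symm | exact h7 h.symm
  rw [hn]
  simp [h0, h1, h2, h3, h4, h5, h6, h7]

lemma tokenize_eq (s : List Char) :
    tokenize_formula s = PySem.Chars.split₀ (expand opChars s) := by
  simp only [tokenize_formula]
  rw [prepared_eq]

lemma expand_id_of_no_op {s : List Char} (h : ∀ c ∈ s, c ∉ opChars) :
    expand opChars s = s := by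
  unfold expand
  calc s.flatMap (fun d => if d ∈ opChars then [' ', d, ' '] else [d])
      = s.flatMap (fun d => [d]) := List.flatMap_congr (fun d hd => by simp [h d hd])
    _ = s := by simp

/-- Every operator occurrence in `s` becomes a standalone token after expansion. -/
lemma op_token_mem {s : List Char} {c : Char} (hcs : c ∈ s) (hcop : c ∈ opChars) :
    [c] ∈ PySem.Chars.split₀ (expand opChars s) := by
  obtain ⟨u, v, rfl⟩ := List.append_of_mem hcs
  have hexp : expand opChars (u ++ c :: v)
      = expand opChars u ++ ' ' :: (c :: ' ' :: expand opChars v) := by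
    unfold expand
    rw [List.flatMap_append, List.flatMap_cons, if_pos hcop]
    simp
  rw [hexp, split₀_append_space]
  have h2 : (c :: ' ' :: expand opChars v) = [c] ++ ' ' :: expand opChars v := rfl
  rw [h2, split₀_append_space, split₀_single (by fin_cases hcop <;> decide)]
  simp

/-- The heart of the equivalence: past the common guards the two programs agree. -/
lemma core_eq (s : List Char) :
    (((tokenize_formula s).length == 1 : Bool) ||
      (tokenize_formula s).any (fun t => (PySem.Dict.get? FORMULA_OPERATORS t).isSome)) =
    ((!(PySem.Set.inter (PySem.Set.ofList s) (PySem.Set.ofList "+-/=*()".toList)).isEmpty) ||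
      (((PySem.Chars.split₀ s).length == 1 : Bool) || ((PySem.Chars.split₀ s).contains ['x']))) := by
  by_cases hop : ∃ c ∈ s, c ∈ opChars
  · obtain ⟨c, hcs, hcop⟩ := hop
    have hA : (tokenize_formula s).any
        (fun t => (PySem.Dict.get? FORMULA_OPERATORS t).isSome) = true := by
      rw [tokenize_eq, List.any_eq_true]
      refine ⟨[c], op_token_mem hcs hcop, ?_⟩
      rw [get?_isSome_iff]
      fin_cases hcop <;> simp
    have hB : (!(PySem.Set.inter (PySem.Set.ofList s)
        (PySem.Set.ofList "+-/=*()".toList)).isEmpty) = true := by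
      have hc1 : c ∈ PySem.Set.ofList s := (PySem.Set.mem_ofList _ _).mpr hcs
      have hc2 : (PySem.Set.ofList "+-/=*()".toList).contains c = true := by
        fin_cases hcop <;> decide
      have hmem : c ∈ PySem.Set.inter (PySem.Set.ofList s) (PySem.Set.ofList "+-/=*()".toList) :=
        List.mem_filter.mpr ⟨hc1, hc2⟩
      have hne := List.ne_nil_of_mem hmem
      simp only [Bool.not_eq_true']
      exact List.isEmpty_eq_false_iff.mpr hne
    rw [hA, hB]
    simp
  · have hop' : ∀ c ∈ s, c ∉ opChars := by
      intro c hc hco; exact hop ⟨c, hc, hco⟩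
    have hid : expand opChars s = s := expand_id_of_no_op hop'
    rw [tokenize_eq, hid]
    have hB : (PySem.Set.inter (PySem.Set.ofList s)
        (PySem.Set.ofList "+-/=*()".toList)).isEmpty = true := by
      rw [List.isEmpty_iff]
      rw [show PySem.Set.inter (PySem.Set.ofList s) (PySem.Set.ofList "+-/=*()".toList)
          = List.filter (fun x => (PySem.Set.ofList "+-/=*()".toList).contains x)
              (PySem.Set.ofList s) from rfl]
      rw [List.filter_eq_nil_iff]
      intro x hx
      have hxs : x ∈ s := (PySem.Set.mem_ofList _ _).mp hx
      have hxop := hop' x hxs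
      intro hcontains
      have hxin : x ∈ ("+-/=*()".toList) := by
        have := (List.contains_iff_mem).mp hcontains
        exact (PySem.Set.mem_ofList _ _).mp this
      have hx7 : x ∈ (['+', '-', '/', '=', '*', '(', ')'] : List Char) := by
        simpa using hxin
      apply hxop
      fin_cases hx7 <;> decide
    have hany : (PySem.Chars.split₀ s).any
        (fun t => (PySem.Dict.get? FORMULA_OPERATORS t).isSome)
        = ((PySem.Chars.split₀ s).contains ['x']) := by
      rw [show ((PySem.Chars.split₀ s).contains ['x'])
          = (PySem.Chars.split₀ s).any (fun t => t == ['x']) from (List.any_beq').symm]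
      apply PySem.List.any_congr_mem
      intro t ht
      by_cases hx : t = ['x']
      · subst hx; decide
      · have h1 : (PySem.Dict.get? FORMULA_OPERATORS t).isSome = false := by
          rw [Bool.eq_false_iff]
          intro hsome
          rcases (get?_isSome_iff t).mp hsome with h | h | h | h | h | h | h | h
          · exact hop' '*' (split₀_chars_subset ht (by simp [h])) (by decide)
          · exact hop' '+' (split₀_chars_subset ht (by simp [h])) (by decide)
          · exact hop' '-' (split₀_chars_subset ht (by simp [h])) (by decide)
          · exact hop' '/' (split₀_chars_subset ht (by simp [h])) (by decide)
          · exact hop' '=' (split₀_chars_subset ht (by simp [h])) (by decide)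
          · exact hx h
          · exact hop' '(' (split₀_chars_subset ht (by simp [h])) (by decide)
          · exact hop' ')' (split₀_chars_subset ht (by simp [h])) (by decide)
        rw [h1]
        simp [hx]
    rw [hB, hany]
    simp

-- ===== VERDICT (by name: the statement is the Claim_ definition above) =====
theorem is_symbolic_formula_spec : Claim_equal_is_symbolic_formula := by
  intro formula _
  unfold Spec_is_symbolic_formula is_symbolic_formula is_symbolic_formula_alt
  by_cases h1 : (PySem.Chars.strip formula.toList).isEmpty
  · simp only [h1, if_true]
  · simp only [h1, Bool.false_eq_true, if_false]
    by_cases h2 : PySem.Chars.startswith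
        (PySem.Chars.lower (PySem.Chars.strip formula.toList)) "calculated based on".toList
    · simp only [h2, if_true]
    · simp only [h2, Bool.false_eq_true, if_false]
      rw [show ∀ (b c : Bool), (if b = true then true else c) = (b || c) from by decide,
          show ∀ (b c : Bool), (if b = true then true else c) = (b || c) from by decide]
      exact core_eq (PySem.Chars.strip formula.toList)
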